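-- pv_equiv track=rewrite | github.com/wesheets/personal-ai-agent | app/modules/orchestrator_scope.py | analyze_goal_for_modules
-- ===== SOURCE A (Python) =====
-- from typing import List, Dict, Any, Optional
--
-- def analyze_goal_for_modules(goal: str) -> List[str]:
--     """
--     Analyze the goal to determine required modules.
--
--     Args:
--         goal: High-level user goal
--
--     Returns:
--         List of required modules
--     """
--     # Base modules that are almost always required
--     base_modules = ["write", "read", "reflect"]
--
--     # Additional modules based on goal keywords
--     additional_modules = []
--
--     # Check for keywords in the goal
--     goal_lower = goal.lower()
--
--     if any(keyword in goal_lower for keyword in ["summarize", "summary", "summarization"]):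
--         additional_modules.append("summarize")
--
--     if any(keyword in goal_lower for keyword in ["task", "status", "progress", "track"]):
--         additional_modules.append("task/status")
--
--     if any(keyword in goal_lower for keyword in ["train", "learning", "teach"]):
--         additional_modules.append("train")
--
--     if any(keyword in goal_lower for keyword in ["delegate", "assign", "handoff"]):
--         additional_modules.append("delegate")
--
--     if any(keyword in goal_lower for keyword in ["loop", "iterate", "cycle"]):
--         additional_modules.append("loop")
--
--     # Combine base and additional modules
--     required_modules = base_modules + additional_modules
--
--     return required_modules
-- ===== SOURCE B (Python) =====
-- from typing import List
--
-- # Text-driven multi-pattern scan: walk the goal once position by position,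
-- # matching every keyword at each position (naive Aho-Corasick style), collect
-- # the triggered modules in a set, then emit them in the fixed rule order.
--
-- _KEYWORD_MODULE = [
--     ("summarize", "summarize"), ("summary", "summarize"), ("summarization", "summarize"),
--     ("task", "task/status"), ("status", "task/status"), ("progress", "task/status"), ("track", "task/status"),
--     ("train", "train"), ("learning", "train"), ("teach", "train"),
--     ("delegate", "delegate"), ("assign", "delegate"), ("handoff", "delegate"),
--     ("loop", "loop"), ("iterate", "loop"), ("cycle", "loop"),
-- ]
--
-- _ORDER = ["summarize", "task/status", "train", "delegate", "loop"]
--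
-- def analyze_goal_for_modules(goal: str) -> List[str]:
--     g = goal.lower()
--     hits = {mod
--             for i in range(len(g))
--             for kw, mod in _KEYWORD_MODULE
--             if g.startswith(kw, i)}
--     return ["write", "read", "reflect"] + [m for m in _ORDER if m in hits]
-- ===== Notes on version B (the rewrite author's own statement) =====
-- stated objective: alternative
-- what changed: Instead of five per-keyword substring searches, B scans the lowered goal once position by position, matching every keyword at each position (naive multi-pattern scan) into a set of hit modules, then emits the modules in fixed rule order.
import Mathlib
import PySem

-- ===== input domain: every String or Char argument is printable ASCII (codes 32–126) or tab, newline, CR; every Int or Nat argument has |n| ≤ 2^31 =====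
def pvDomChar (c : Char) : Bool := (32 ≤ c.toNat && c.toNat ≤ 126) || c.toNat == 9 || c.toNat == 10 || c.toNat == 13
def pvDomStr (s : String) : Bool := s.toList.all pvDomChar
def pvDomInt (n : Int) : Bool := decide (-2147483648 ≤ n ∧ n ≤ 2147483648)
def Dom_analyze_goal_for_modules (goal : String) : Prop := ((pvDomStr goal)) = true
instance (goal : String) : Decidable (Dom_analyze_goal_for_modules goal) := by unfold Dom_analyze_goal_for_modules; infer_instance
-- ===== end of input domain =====

-- B replaces A's five per-keyword substring searches by one text-driven scan collecting hit modules in a set (alternative algorithm, same cost).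
-- ===== PORT A =====
def analyze_goal_for_modules (goal : String) : List String :=
  let base_modules : List String := ["write", "read", "reflect"]
  let additional_modules : List String := []
  let goal_lower := PySem.Str.lower goal
  let additional_modules :=
    if (["summarize", "summary", "summarization"].any fun k => PySem.Str.isIn k goal_lower)
    then additional_modules ++ ["summarize"] else additional_modules
  let additional_modules :=
    if (["task", "status", "progress", "track"].any fun k => PySem.Str.isIn k goal_lower)
    then additional_modules ++ ["task/status"] else additional_modules
  let additional_modules :=
    if (["train", "learning", "teach"].any fun k => PySem.Str.isIn k goal_lower)
    then additional_modules ++ ["train"] else additional_modules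
  let additional_modules :=
    if (["delegate", "assign", "handoff"].any fun k => PySem.Str.isIn k goal_lower)
    then additional_modules ++ ["delegate"] else additional_modules
  let additional_modules :=
    if (["loop", "iterate", "cycle"].any fun k => PySem.Str.isIn k goal_lower)
    then additional_modules ++ ["loop"] else additional_modules
  base_modules ++ additional_modules

-- ===== PORT B =====
def pvKeywordModule : List (String × String) :=
  [("summarize", "summarize"), ("summary", "summarize"), ("summarization", "summarize"),
   ("task", "task/status"), ("status", "task/status"), ("progress", "task/status"), ("track", "task/status"),
   ("train", "train"), ("learning", "train"), ("teach", "train"),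
   ("delegate", "delegate"), ("assign", "delegate"), ("handoff", "delegate"),
   ("loop", "loop"), ("iterate", "loop"), ("cycle", "loop")]

def pvOrder : List String := ["summarize", "task/status", "train", "delegate", "loop"]

-- Python's g.startswith(kw, i) with 0 ≤ i < len(g) is exactly 'kw is a prefix of g[i:]',
-- i.e. PySem.Chars.startswith (g.drop i.toNat) kw.toList (i nonnegative from range).
def analyze_goal_for_modules_alt (goal : String) : List String :=
  let g := (PySem.Str.lower goal).toList
  let hits : PySem.Set String :=
    PySem.Set.ofList ((PySem.List.pyRange 0 (g.length : Int) 1).flatMap (fun i =>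
      (pvKeywordModule.filter (fun kv =>
        PySem.Chars.startswith (g.drop i.toNat) kv.1.toList)).map (fun kv => kv.2)))
  ["write", "read", "reflect"] ++ pvOrder.filter (fun m => PySem.Set.contains hits m)

-- ===== PRECONDITION & SPEC =====
def Spec_analyze_goal_for_modules (goal : String) (out : List String) : Prop := out = analyze_goal_for_modules_alt goal
instance (goal : String) (out : List String) : Decidable (Spec_analyze_goal_for_modules goal out) := by unfold Spec_analyze_goal_for_modules; infer_instance

-- ===== CLAIM (what is proved, stated in full; the proofs are below) =====
def Claim_equal_analyze_goal_for_modules : Prop := ∀ (goal : String), Dom_analyze_goal_for_modules goal → Spec_analyze_goal_for_modules goal (analyze_goal_for_modules goal)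

-- ===== LEMMAS AND PROOFS =====

-- A nonempty keyword is found at some scan position of the range iff it is a substring.
lemma pv_exists_pos_iff (g kw : List Char) (hkw : kw ≠ []) :
    (∃ i : Int, (0 ≤ i ∧ i < (g.length : Int)) ∧ kw <+: g.drop i.toNat) ↔
      PySem.Chars.isIn kw g = true := by
  rw [← PySem.Chars.exists_prefix_drop_iff_isIn]
  constructor
  · rintro ⟨i, _, h⟩; exact ⟨i.toNat, h⟩
  · rintro ⟨j, h⟩
    have hj : j < g.length := by
      by_contra hge
      rw [List.drop_eq_nil_of_le (by omega)] at h
      exact hkw (List.prefix_nil.mp h)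
    exact ⟨(j : Int), ⟨by omega, by exact_mod_cast hj⟩, by simpa using h⟩

-- Membership in B's hit set is 'some keyword of that module occurs in g'.
lemma pv_contains_hits (g : List Char) (m : String) :
    PySem.Set.contains
      (PySem.Set.ofList ((PySem.List.pyRange 0 (g.length : Int) 1).flatMap (fun i =>
        (pvKeywordModule.filter (fun kv =>
          PySem.Chars.startswith (g.drop i.toNat) kv.1.toList)).map (fun kv => kv.2)))) m = true ↔
      ∃ kv ∈ pvKeywordModule, kv.2 = m ∧ kv.1 ≠ "" ∧ PySem.Chars.isIn kv.1.toList g = true := by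
  rw [PySem.Set.contains_iff, PySem.Set.mem_ofList]
  simp only [List.mem_flatMap, List.mem_map, List.mem_filter,
    PySem.List.mem_pyRange_one, PySem.Chars.startswith_iff]
  constructor
  · rintro ⟨i, hi, kv, ⟨hkv, hpre⟩, hm⟩
    have hne : kv.1 ≠ "" := by
      revert hkv; unfold pvKeywordModule; intro hkv; fin_cases hkv <;> decide
    exact ⟨kv, hkv, hm, hne,
      (pv_exists_pos_iff g kv.1.toList (by simpa using hne)).mp ⟨i, hi, hpre⟩⟩
  · rintro ⟨kv, hkv, hm, hne, hin⟩
    obtain ⟨i, hi, hpre⟩ := (pv_exists_pos_iff g kv.1.toList (by simpa using hne)).mpr hin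
    exact ⟨i, hi, kv, ⟨hkv, hpre⟩, hm⟩

-- ===== VERDICT (by name: the statement is the Claim_ definition above) =====
set_option maxHeartbeats 1000000 in
theorem analyze_goal_for_modules_spec : Claim_equal_analyze_goal_for_modules := by
  intro goal _
  unfold Spec_analyze_goal_for_modules analyze_goal_for_modules analyze_goal_for_modules_alt
  set g := (PySem.Str.lower goal).toList with hg
  have hstr : ∀ k : String, PySem.Str.isIn k (PySem.Str.lower goal) = PySem.Chars.isIn k.toList g := by
    intro k; simp [PySem.Str.isIn, hg]
  have key : ∀ m : String,
      PySem.Set.contains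
        (PySem.Set.ofList ((PySem.List.pyRange 0 (g.length : Int) 1).flatMap (fun i =>
          (pvKeywordModule.filter (fun kv =>
            PySem.Chars.startswith (g.drop i.toNat) kv.1.toList)).map (fun kv => kv.2)))) m =
        pvKeywordModule.any (fun kv => kv.2 == m && PySem.Chars.isIn kv.1.toList g) := by
    intro m
    by_cases h : ∃ kv ∈ pvKeywordModule, kv.2 = m ∧ kv.1 ≠ "" ∧ PySem.Chars.isIn kv.1.toList g = true
    · rw [(pv_contains_hits g m).mpr h]
      obtain ⟨kv, hkv, hm, _, hin⟩ := h
      exact (List.any_eq_true.mpr ⟨kv, hkv, by simp [hm, hin]⟩).symm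
    · rw [Bool.eq_iff_iff]
      constructor
      · intro hc; exact absurd ((pv_contains_hits g m).mp hc) h
      · intro ha
        obtain ⟨kv, hkv, hb⟩ := List.any_eq_true.mp ha
        obtain ⟨h1, h2⟩ := Bool.and_eq_true_iff.mp hb
        have hne : kv.1 ≠ "" := by
          revert hkv; unfold pvKeywordModule; intro hkv; fin_cases hkv <;> decide
        exact absurd ⟨kv, hkv, eq_of_beq h1, hne, h2⟩ h
  simp only [pvOrder, List.filter_cons, List.filter_nil]
  simp only [key]
  simp only [pvKeywordModule, List.any_cons, List.any_nil, hstr,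
    List.any_cons, List.any_nil, Bool.or_false]
  by_cases h1 : (PySem.Chars.isIn "summarize".toList g = true ∨ PySem.Chars.isIn "summary".toList g = true ∨ PySem.Chars.isIn "summarization".toList g = true) <;>
  by_cases h2 : (PySem.Chars.isIn "task".toList g = true ∨ PySem.Chars.isIn "status".toList g = true ∨ PySem.Chars.isIn "progress".toList g = true ∨ PySem.Chars.isIn "track".toList g = true) <;>
  by_cases h3 : (PySem.Chars.isIn "train".toList g = true ∨ PySem.Chars.isIn "learning".toList g = true ∨ PySem.Chars.isIn "teach".toList g = true) <;>
  by_cases h4 : (PySem.Chars.isIn "delegate".toList g = true ∨ PySem.Chars.isIn "assign".toList g = true ∨ PySem.Chars.isIn "handoff".toList g = true) <;>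
  by_cases h5 : (PySem.Chars.isIn "loop".toList g = true ∨ PySem.Chars.isIn "iterate".toList g = true ∨ PySem.Chars.isIn "cycle".toList g = true) <;>
  simp_all
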